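-- pv_equiv track=rewrite | github.com/yuj1818/TIL | codingtest/프로그래머스 힌트 스테이지.py | solution
-- ===== SOURCE A (Python) =====
-- from itertools import product
--
-- def solution(cost, hint):
--     N = len(cost)
--     ans = float('inf')
--     cases = list(product((0, 1), repeat=N - 1))
--     for case in cases:
--         hcnt = [0] * (N + 1)
--         total = 0
--         for i in range(N - 1):
--             if case[i]:
--                 total += hint[i][0]
--                 for j in range(1, len(hint[i])): hcnt[hint[i][j]] += 1
--         for s in range(N): total += cost[s][min(N - 1, hcnt[s + 1])]
--         if ans > total: ans = total
--     return ans
-- ===== SOURCE B (Python) =====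
-- def solution(cost, hint):
--     # Recursive DFS over hint indices, threading the running hint-cost and the
--     # counter array incrementally instead of rebuilding them per product tuple.
--     N = len(cost)
--
--     def leaf(acc, hcnt):
--         return acc + sum(cost[s][min(N - 1, hcnt[s + 1])] for s in range(N))
--
--     def dfs(i, acc, hcnt):
--         if i == N - 1:
--             return leaf(acc, hcnt)
--         skip = dfs(i + 1, acc, hcnt)
--         h2 = hcnt[:]
--         for j in range(1, len(hint[i])):
--             h2[hint[i][j]] += 1
--         take = dfs(i + 1, acc + hint[i][0], h2)
--         return min(skip, take)
--
--     return dfs(0, 0, [0] * (N + 1))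
-- ===== Notes on version B (the rewrite author's own statement) =====
-- stated objective: faster
-- what changed: Replaces A's materialised itertools.product list and per-case from-scratch rebuild of (total, hcnt) by a recursive take/skip DFS that threads the running hint cost and the counter array incrementally, sharing all prefix work between cases.
import Mathlib
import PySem

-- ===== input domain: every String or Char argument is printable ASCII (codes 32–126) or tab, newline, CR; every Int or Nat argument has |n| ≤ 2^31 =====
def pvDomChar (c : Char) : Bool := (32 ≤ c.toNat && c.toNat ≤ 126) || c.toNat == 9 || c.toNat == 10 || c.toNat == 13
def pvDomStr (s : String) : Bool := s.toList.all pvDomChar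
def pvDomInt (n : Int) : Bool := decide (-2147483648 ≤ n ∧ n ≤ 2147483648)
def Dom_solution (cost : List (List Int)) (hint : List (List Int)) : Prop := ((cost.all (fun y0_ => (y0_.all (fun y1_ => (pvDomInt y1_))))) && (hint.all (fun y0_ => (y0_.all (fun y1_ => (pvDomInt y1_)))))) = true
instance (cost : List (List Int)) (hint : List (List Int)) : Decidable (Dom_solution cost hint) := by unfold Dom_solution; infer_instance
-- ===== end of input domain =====

-- B replaces A's materialised itertools.product list (with a per-case rebuild of the
-- counter array) by a recursive DFS that threads the running hint cost and counter
-- array incrementally, sharing all prefix work between cases (measured constant-factor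
-- speedup); same return value on every input where A returns.

-- ===== PORT A =====
-- list(product((0, 1), repeat=k)), in itertools order (first coordinate outermost)
def prodCases : Nat → List (List Int)
  | 0 => [[]]
  | k + 1 => (prodCases k).map (fun c => 0 :: c) ++ (prodCases k).map (fun c => 1 :: c)

-- the inner loop 'for j in range(1, len(hi)): hcnt[hi[j]] += 1', which appears
-- verbatim in both Python sources (shared like a PySem primitive)
def bumpCnt (hi : List Int) (hcnt : List Int) : List Int :=
  (PySem.List.pyRange 1 (hi.length : Int) 1).foldl
    (fun h j => PySem.List.pySetD h (PySem.List.pyGetD hi j 0)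
        (PySem.List.pyGetD h (PySem.List.pyGetD hi j 0) 0 + 1)) hcnt

-- the body of A's per-case loop: rebuild (total, hcnt) from the product tuple c,
-- then add the stage costs (named so the outer loop stays readable)
def caseTotalA (cost hint : List (List Int)) (N : Nat) (c : List Int) : Int :=
  let st := (PySem.List.pyRange 0 ((N : Int) - 1) 1).foldl
    (fun (st : Int × List Int) i =>
      if PySem.List.pyGetD c i 0 ≠ 0 then
        (st.1 + PySem.List.pyGetD (PySem.List.pyGetD hint i []) 0 0,
         bumpCnt (PySem.List.pyGetD hint i []) st.2)
      else st)
    ((0 : Int), List.replicate (N + 1) (0 : Int))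
  (PySem.List.pyRange 0 (N : Int) 1).foldl
    (fun t s => t + PySem.List.pyGetD (PySem.List.pyGetD cost s [])
        (min ((N : Int) - 1) (PySem.List.pyGetD st.2 (s + 1) 0)) 0) st.1

def solution (cost : List (List Int)) (hint : List (List Int)) : Int :=
  let N := cost.length
  let cases := prodCases (N - 1)
  let ans : Option Int := cases.foldl (fun (ans : Option Int) (c : List Int) =>
    let total := caseTotalA cost hint N c
    match ans with
    | none => some total
    | some a => if a > total then some total else some a) none
  -- ans = float('inf') (no case) is impossible under Pre_ (N ≥ 1); .getD 0 is never taken there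
  ans.getD 0

-- ===== PORT B =====
-- leaf(acc, hcnt) = acc + sum(cost[s][min(N-1, hcnt[s+1])] for s in range(N))
def leafAlt (cost : List (List Int)) (N : Nat) (acc : Int) (hcnt : List Int) : Int :=
  acc + ((PySem.List.pyRange 0 (N : Int) 1).map
    (fun s => PySem.List.pyGetD (PySem.List.pyGetD cost s [])
        (min ((N : Int) - 1) (PySem.List.pyGetD hcnt (s + 1) 0)) 0)).sum

-- dfs(i, acc, hcnt); recursion on the fuel rem = (N-1) - i (Python's 'if i == N - 1' base case)
def dfsAlt (cost hint : List (List Int)) (N : Nat) : Nat → Nat → Int → List Int → Int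
  | 0, _i, acc, hcnt => leafAlt cost N acc hcnt
  | rem + 1, i, acc, hcnt =>
    min (dfsAlt cost hint N rem (i + 1) acc hcnt)
        (dfsAlt cost hint N rem (i + 1)
          (acc + PySem.List.pyGetD (PySem.List.pyGetD hint (i : Int) []) 0 0)
          (bumpCnt (PySem.List.pyGetD hint (i : Int) []) hcnt))

def solution_alt (cost : List (List Int)) (hint : List (List Int)) : Int :=
  let N := cost.length
  dfsAlt cost hint N (N - 1) 0 0 (List.replicate (N + 1) (0 : Int))

-- ===== PRECONDITION & SPEC =====
-- helpers for Pre_: a hint reference x indexes the length-(N+1) counter list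
-- (Python resolves a negative x to x + N + 1); pvRefCount counts the references to stage s+1
def pvResolve (N : Nat) (x : Int) : Int := if x < 0 then x + ((N : Int) + 1) else x
def pvRefCount (N : Nat) (hint : List (List Int)) (s : Nat) : Nat :=
  ((hint.take (N - 1)).map (fun h => h.tail.countP (fun x => pvResolve N x == (s : Int) + 1))).sum

-- Pre_ = exactly the inputs where the Python A returns (otherwise it raises ValueError /
-- IndexError): N ≥ 1; each of the first N-1 hint rows exists, is nonempty, and its
-- references index the length-(N+1) counter list; and each cost row is long enough for the
-- largest reachable index min(N-1, number of references to that stage).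
def Pre_solution (cost : List (List Int)) (hint : List (List Int)) : Prop :=
  cost ≠ [] ∧
  ((List.range (cost.length - 1)).all (fun i =>
      match hint[i]? with
      | none => false
      | some h => !h.isEmpty &&
          h.tail.all (fun x => decide (-((cost.length : Int) + 1) ≤ x ∧ x ≤ (cost.length : Int)))) = true) ∧
  ((List.range cost.length).all (fun s =>
      decide (min (cost.length - 1) (pvRefCount cost.length hint s) < (cost.getD s []).length)) = true)

instance (cost : List (List Int)) (hint : List (List Int)) : Decidable (Pre_solution cost hint) := by
  unfold Pre_solution; infer_instance

def pvWitness_solution : List (List Int) × List (List Int) := ([[1, 2], [3, 4]], [[10, 2]])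

def Spec_solution (cost : List (List Int)) (hint : List (List Int)) (out : Int) : Prop := out = solution_alt cost hint
instance (cost : List (List Int)) (hint : List (List Int)) (out : Int) : Decidable (Spec_solution cost hint out) := by unfold Spec_solution; infer_instance

-- ===== CLAIM (what is proved, stated in full; the proofs are below) =====
def Claim_equal_solution : Prop := ∀ (cost : List (List Int)) (hint : List (List Int)), Dom_solution cost hint → Pre_solution cost hint → Spec_solution cost hint (solution cost hint)

-- ===== LEMMAS AND PROOFS =====

-- the state (total, hcnt) after deciding the bits bs for hints i, i+1, …
def G (hint : List (List Int)) : List Int → Nat → Int × List Int → Int × List Int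
  | [], _, st => st
  | b :: bs, i, st =>
    if b ≠ 0 then
      G hint bs (i + 1) (st.1 + PySem.List.pyGetD (PySem.List.pyGetD hint (i : Int) []) 0 0,
                         bumpCnt (PySem.List.pyGetD hint (i : Int) []) st.2)
    else G hint bs (i + 1) st

-- total cost of the completed case: decide bits c from index i, then the leaf sum
def Ftot (cost hint : List (List Int)) (N : Nat) (c : List Int) (i : Nat) (acc : Int) (h : List Int) : Int :=
  leafAlt cost N (G hint c i (acc, h)).1 (G hint c i (acc, h)).2

-- min of a nonempty list (junk 0 on [])
def min1 : List Int → Int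
  | [] => 0
  | x :: xs => xs.foldl min x

lemma foldl_min_init (l : List Int) : ∀ (a b : Int), l.foldl min (min a b) = min a (l.foldl min b) := by
  induction l with
  | nil => intro a b; rfl
  | cons x xs ih =>
    intro a b
    simpa [List.foldl_cons, min_assoc] using ih a (min b x)

lemma min1_append {xs ys : List Int} (hx : xs ≠ []) (hy : ys ≠ []) :
    min1 (xs ++ ys) = min (min1 xs) (min1 ys) := by
  rcases xs with _ | ⟨x, xs'⟩
  · exact absurd rfl hx
  rcases ys with _ | ⟨y, ys'⟩
  · exact absurd rfl hy
  simp only [min1, List.cons_append, List.foldl_append, List.foldl_cons]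
  exact foldl_min_init ys' (xs'.foldl min x) y

lemma prodCases_ne_nil (k : Nat) : prodCases k ≠ [] := by
  induction k with
  | zero => simp [prodCases]
  | succ k ih => simp [prodCases, ih]

lemma length_of_mem_prodCases : ∀ {k : Nat} {c : List Int}, c ∈ prodCases k → c.length = k := by
  intro k
  induction k with
  | zero => intro c hc; simp [prodCases] at hc; simp [hc]
  | succ k ih =>
    intro c hc
    simp only [prodCases, List.mem_append, List.mem_map] at hc
    rcases hc with ⟨d, hd, rfl⟩ | ⟨d, hd, rfl⟩ <;> simp [ih hd]

-- B's dfs computes the min of Ftot over all bit lists of the given length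
lemma dfsAlt_eq_min1 (cost hint : List (List Int)) (N : Nat) :
    ∀ (rem i : Nat) (acc : Int) (h : List Int),
      dfsAlt cost hint N rem i acc h
        = min1 ((prodCases rem).map (fun c => Ftot cost hint N c i acc h)) := by
  intro rem
  induction rem with
  | zero => intro i acc h; simp [dfsAlt, prodCases, min1, Ftot, G]
  | succ rem ih =>
    intro i acc h
    have h0 : (prodCases rem).map (fun c => Ftot cost hint N (0 :: c) i acc h)
        = (prodCases rem).map (fun c => Ftot cost hint N c (i + 1) acc h) := by
      apply List.map_congr_left; intro c _; simp [Ftot, G]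
    have h1 : (prodCases rem).map (fun c => Ftot cost hint N (1 :: c) i acc h)
        = (prodCases rem).map (fun c => Ftot cost hint N c (i + 1)
            (acc + PySem.List.pyGetD (PySem.List.pyGetD hint (i : Int) []) 0 0)
            (bumpCnt (PySem.List.pyGetD hint (i : Int) []) h)) := by
      apply List.map_congr_left; intro c _; simp [Ftot, G]
    simp only [dfsAlt, ih]
    rw [prodCases, List.map_append,
        min1_append (by simp [prodCases_ne_nil rem]) (by simp [prodCases_ne_nil rem]),
        List.map_map, List.map_map]
    simp only [Function.comp_def]
    rw [h0, h1]

-- A's inner i-loop over the case bits computes G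
lemma Afold (hint : List (List Int)) (w : List Int) :
    ∀ (bs : List Int) (i0 : Nat), w.drop i0 = bs → ∀ (st : Int × List Int),
      (PySem.List.pyRange (i0 : Int) ((i0 : Int) + (bs.length : Int)) 1).foldl
        (fun (st : Int × List Int) i =>
          if PySem.List.pyGetD w i 0 ≠ 0 then
            (st.1 + PySem.List.pyGetD (PySem.List.pyGetD hint i []) 0 0,
             bumpCnt (PySem.List.pyGetD hint i []) st.2)
          else st) st
      = G hint bs i0 st := by
  intro bs
  induction bs with
  | nil =>
    intro i0 _ st
    have e0 : ((i0 : Int) + ((List.nil (α := Int)).length : Int)) = (i0 : Int) := by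
      norm_num
    rw [e0, PySem.List.pyRange_one_eq_nil le_rfl]
    rfl
  | cons b bs ih =>
    intro i0 hdrop st
    have hb : PySem.List.pyGetD w (i0 : Int) 0 = b := by
      have h1 : w[i0]? = some b := by
        have h2 := congrArg (fun l : List Int => l[0]?) hdrop
        simpa [List.getElem?_drop] using h2
      simp [PySem.List.pyGetD_natCast, List.getD, h1]
    have hdrop' : w.drop (i0 + 1) = bs := by
      have h3 := congrArg (List.drop 1) hdrop
      simpa [List.drop_drop, Nat.add_comm] using h3
    have hlt : (i0 : Int) < (i0 : Int) + (((b :: bs).length : Nat) : Int) := by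
      push_cast [List.length_cons]; omega
    rw [PySem.List.pyRange_one_cons hlt]
    rw [List.foldl_cons, hb]
    have e1 : ((i0 : Int) + 1) = ((i0 + 1 : Nat) : Int) := by push_cast; ring
    have e2 : (i0 : Int) + (((b :: bs).length : Nat) : Int)
        = ((i0 + 1 : Nat) : Int) + (bs.length : Int) := by
      push_cast [List.length_cons]; ring
    rw [e1, e2]
    by_cases hb0 : b ≠ 0
    · rw [if_pos hb0, ih (i0 + 1) hdrop']
      simp [G, hb0, bumpCnt, bumpCnt]
    · rw [if_neg hb0, ih (i0 + 1) hdrop']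
      simp at hb0
      simp [G, hb0]

-- Afold specialised to the whole case list (i0 = 0), endpoint generalised
lemma Afold0 (hint : List (List Int)) (c : List Int) (st : Int × List Int)
    {e : Int} (he : e = (c.length : Int)) :
    (PySem.List.pyRange 0 e 1).foldl
      (fun (st : Int × List Int) i =>
        if PySem.List.pyGetD c i 0 ≠ 0 then
          (st.1 + PySem.List.pyGetD (PySem.List.pyGetD hint i []) 0 0,
           bumpCnt (PySem.List.pyGetD hint i []) st.2)
        else st) st
    = G hint c 0 st := by
  subst he
  have h := Afold hint c c 0 (by simp) st
  simpa using h

-- A's per-case body equals the DFS total of the same bit list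
lemma caseTotalA_eq (cost hint : List (List Int)) (N : Nat) (c : List Int)
    (h : ((N : Int) - 1) = (c.length : Int)) :
    caseTotalA cost hint N c = Ftot cost hint N c 0 0 (List.replicate (N + 1) (0 : Int)) := by
  simp only [caseTotalA]
  rw [Afold0 hint c _ h, PySem.List.foldl_add]
  rfl

-- the running-min loop 'if ans > total: ans = total' over an Option accumulator
lemma optfold {α : Type} (f : α → Int) :
    ∀ (l : List α) (a : Int),
      l.foldl (fun ans c =>
        match ans with
        | none => some (f c)
        | some x => if x > f c then some (f c) else some x) (some a)
      = some ((l.map f).foldl min a) := by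
  intro l
  induction l with
  | nil => intro a; rfl
  | cons x xs ih =>
    intro a
    have : (if a > f x then some (f x) else some a) = some (min a (f x)) := by
      split_ifs with h
      · rw [min_eq_right (by omega)]
      · rw [min_eq_left (by omega)]
    simp only [List.foldl_cons, List.map_cons, this, ih]

-- ===== VERDICT (by name: the statement is the Claim_ definition above) =====

theorem solution_spec : Claim_equal_solution := by
  intro cost hint _hdom hpre
  unfold Spec_solution
  obtain ⟨hne, -, -⟩ := hpre
  have hN : 1 ≤ cost.length := List.length_pos_iff.mpr hne
  -- characterise A
  have hA : solution cost hint
      = min1 ((prodCases (cost.length - 1)).map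
          (fun c => Ftot cost hint cost.length c 0 0 (List.replicate (cost.length + 1) (0 : Int)))) := by
    simp only [solution]
    have h2 : (prodCases (cost.length - 1)).foldl
        (fun (ans : Option Int) (c : List Int) =>
          match ans with
          | none => some (caseTotalA cost hint cost.length c)
          | some a => if a > caseTotalA cost hint cost.length c
              then some (caseTotalA cost hint cost.length c) else some a) none
      = (prodCases (cost.length - 1)).foldl
        (fun (ans : Option Int) (c : List Int) =>
          match ans with
          | none => some (Ftot cost hint cost.length c 0 0 (List.replicate (cost.length + 1) (0 : Int)))
          | some a => if a > Ftot cost hint cost.length c 0 0 (List.replicate (cost.length + 1) (0 : Int))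
              then some (Ftot cost hint cost.length c 0 0 (List.replicate (cost.length + 1) (0 : Int)))
              else some a) none := by
      apply List.foldl_ext
      intro a c hc
      have hlen : c.length = cost.length - 1 := length_of_mem_prodCases hc
      rw [caseTotalA_eq cost hint cost.length c (by rw [hlen]; omega)]
    rw [h2]
    rcases hcs : prodCases (cost.length - 1) with _ | ⟨c, cs⟩
    · exact absurd hcs (prodCases_ne_nil _)
    rw [List.foldl_cons]
    have hstep := optfold
      (fun c => Ftot cost hint cost.length c 0 0 (List.replicate (cost.length + 1) (0 : Int))) cs
      (Ftot cost hint cost.length c 0 0 (List.replicate (cost.length + 1) (0 : Int)))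
    simp only [hstep, min1, List.map_cons, List.foldl_map]
    rfl
  rw [hA]
  simp only [solution_alt]
  rw [dfsAlt_eq_min1]
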